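-- pv_equiv track=rewrite | github.com/cod3vil/hive-system-node | backend/hive/queen_bee.py | _compute_alternating_counts
-- ===== SOURCE A (Python) =====
-- from typing import List, Dict, Optional
--
-- def _compute_alternating_counts(total: int, num_strategies: int) -> List[int]:
--     """
--     Round-robin distribution of *total* scouts across *num_strategies*.
--
--     Returns a list of counts where each strategy gets at least 1 scout,
--     and remaining scouts are distributed in alternating (round-robin) order.
--     """
--     if num_strategies == 0:
--         return []
--     counts = [1] * num_strategies          # each strategy gets at least 1
--     remaining = total - num_strategies
--     idx = 0
--     while remaining > 0:
--         counts[idx % num_strategies] += 1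
--         idx += 1
--         remaining -= 1
--     return counts
-- ===== SOURCE B (Python) =====
-- from typing import List
--
-- def _compute_alternating_counts(total: int, num_strategies: int) -> List[int]:
--     if num_strategies <= 0:
--         return []
--     remaining = max(total - num_strategies, 0)
--     base, extra = divmod(remaining, num_strategies)
--     return [1 + base + (1 if i < extra else 0) for i in range(num_strategies)]
-- ===== Notes on version B (the rewrite author's own statement) =====
-- stated objective: alternative
-- what changed: Replaces A's O(total) round-robin increment loop by the closed form base = remaining // n with the first remaining % n strategies getting one extra.
import Mathlib
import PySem

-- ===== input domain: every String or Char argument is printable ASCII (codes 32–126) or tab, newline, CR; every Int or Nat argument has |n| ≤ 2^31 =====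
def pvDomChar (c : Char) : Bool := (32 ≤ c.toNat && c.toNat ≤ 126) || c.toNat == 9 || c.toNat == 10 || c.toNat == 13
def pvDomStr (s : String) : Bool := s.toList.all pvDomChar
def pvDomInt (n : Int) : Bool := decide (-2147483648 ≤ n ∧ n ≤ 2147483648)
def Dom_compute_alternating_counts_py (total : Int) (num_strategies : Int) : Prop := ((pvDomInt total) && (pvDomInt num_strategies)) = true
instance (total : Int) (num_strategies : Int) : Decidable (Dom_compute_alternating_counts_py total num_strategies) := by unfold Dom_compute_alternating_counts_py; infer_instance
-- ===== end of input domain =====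

-- B replaces A's round-robin increment loop by the closed form
-- base = remaining // n with the first remaining % n strategies getting one extra.

-- ===== PORT A =====
-- the 'while remaining > 0' loop of A, step for step
def pvALoop (n : Int) (counts : List Int) (remaining idx : Int) : List Int :=
  if 0 < remaining then
    pvALoop n
      (PySem.List.pySetD counts (PySem.Int.mod idx n)
        (PySem.List.pyGetD counts (PySem.Int.mod idx n) 0 + 1))
      (remaining - 1) (idx + 1)
  else counts
termination_by remaining.toNat
decreasing_by omega

def compute_alternating_counts_py (total : Int) (num_strategies : Int) : List Int :=
  if num_strategies = 0 then []
  else pvALoop num_strategies (List.replicate num_strategies.toNat 1) (total - num_strategies) 0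

-- ===== PORT B =====
def compute_alternating_counts_py_alt (total : Int) (num_strategies : Int) : List Int :=
  if num_strategies ≤ 0 then []
  else
    let remaining := max (total - num_strategies) 0
    let base := PySem.Int.floordiv remaining num_strategies
    let extra := PySem.Int.mod remaining num_strategies
    (PySem.List.pyRange 0 num_strategies 1).map (fun i => 1 + base + (if i < extra then 1 else 0))

-- ===== PRECONDITION & SPEC =====
-- Pre_ excludes exactly the inputs where A raises IndexError: num_strategies < 0 with
-- total > num_strategies makes A index into the empty counts list.
def Pre_compute_alternating_counts_py (total : Int) (num_strategies : Int) : Prop :=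
  0 ≤ num_strategies ∨ total ≤ num_strategies
instance (total : Int) (num_strategies : Int) : Decidable (Pre_compute_alternating_counts_py total num_strategies) := by unfold Pre_compute_alternating_counts_py; infer_instance

def pvWitness_compute_alternating_counts_py : Int × Int := (7, 3)

def Spec_compute_alternating_counts_py (total : Int) (num_strategies : Int) (out : List Int) : Prop := out = compute_alternating_counts_py_alt total num_strategies
instance (total : Int) (num_strategies : Int) (out : List Int) : Decidable (Spec_compute_alternating_counts_py total num_strategies out) := by unfold Spec_compute_alternating_counts_py; infer_instance

-- ===== CLAIM (what is proved, stated in full; the proofs are below) =====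
def Claim_equal_compute_alternating_counts_py : Prop := ∀ (total : Int) (num_strategies : Int), Dom_compute_alternating_counts_py total num_strategies → Pre_compute_alternating_counts_py total num_strategies → Spec_compute_alternating_counts_py total num_strategies (compute_alternating_counts_py total num_strategies)

-- ===== LEMMAS AND PROOFS =====

-- number of increments strategy i receives from r remaining steps starting at index idx
def pvHits (n r idx : Int) (i : Nat) : Int :=
  if 0 < r then pvHits n (r - 1) (idx + 1) i + (if (PySem.Int.mod idx n).toNat = i then 1 else 0)
  else 0
termination_by r.toNat
decreasing_by omega

lemma pvALoop_getElem? (n : Int) (hn : 0 < n) (r idx : Int) (counts : List Int)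
    (hlen : counts.length = n.toNat) (hidx : 0 ≤ idx) (i : Nat) :
    (pvALoop n counts r idx)[i]? = counts[i]?.map (· + pvHits n r idx i) := by
  obtain ⟨k, hk⟩ : ∃ k, r.toNat = k := ⟨_, rfl⟩
  induction k generalizing r idx counts with
  | zero =>
      have hr : ¬ 0 < r := by omega
      rw [pvALoop.eq_def, if_neg hr, pvHits.eq_def, if_neg hr]
      cases counts[i]? <;> simp
  | succ k ih =>
      by_cases hr : 0 < r
      · have hmod : PySem.Int.mod idx n = idx % n := PySem.Int.mod_eq_emod_of_pos hn
        have h0 : 0 ≤ idx % n := Int.emod_nonneg idx (by omega)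
        have h1 : idx % n < n := Int.emod_lt_of_pos idx hn
        have hm : (idx % n).toNat < counts.length := by omega
        rw [pvALoop.eq_def, if_pos hr, pvHits.eq_def, if_pos hr, hmod,
          PySem.List.pySetD_of_nonneg _ _ h0,
          PySem.List.pyGetD_eq_getElem _ _ h0 (by omega)]
        rw [ih (r - 1) (idx + 1) _ (by rw [List.length_set]; exact hlen) (by omega) (by omega)]
        rw [List.getElem?_set]
        by_cases he : (idx % n).toNat = i
        · rw [if_pos he, if_pos (by omega)]
          have : counts[i]? = some (counts[(idx % n).toNat]'hm) := by
            rw [← he]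
            exact List.getElem?_eq_getElem hm
          rw [this, if_pos he]
          simp only [Option.map_some]
          congr 1
          ring
        · rw [if_neg he, if_neg he]
          cases counts[i]? <;> simp
      · have hr' : ¬ 0 < r := hr
        rw [pvALoop.eq_def, if_neg hr', pvHits.eq_def, if_neg hr']
        cases counts[i]? <;> simp

-- t in (-n, n) : its Python mod n
lemma pv_emod_small (n t : Int) (_hn : 0 < n) (h1 : -n ≤ t) (h2 : t < n) :
    t % n = if 0 ≤ t then t else t + n := by
  split_ifs with h
  · exact Int.emod_eq_of_lt h h2
  · have : t % n = (t + n * 1) % n := (Int.add_mul_emod_self_left ..).symm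
    rw [this]
    have : t + n * 1 = t + n := by ring
    rw [this, Int.emod_eq_of_lt (by omega) (by omega)]

lemma pvHits_closed (n : Int) (hn : 0 < n) (r idx : Int) (hidx : 0 ≤ idx)
    (i : Nat) (hi : (i : Int) < n) :
    pvHits n r idx i
      = (if ((i : Int) - idx) % n < r then (r - 1 - (((i : Int) - idx) % n)) / n + 1 else 0) := by
  obtain ⟨k, hk⟩ : ∃ k, r.toNat = k := ⟨_, rfl⟩
  induction k generalizing r idx with
  | zero =>
      have hr : ¬ 0 < r := by omega
      have hd0 : 0 ≤ ((i : Int) - idx) % n := Int.emod_nonneg _ (by omega)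
      rw [pvHits.eq_def, if_neg hr, if_neg (by omega)]
  | succ k ih =>
      by_cases hr : 0 < r
      · set d : Int := ((i : Int) - idx) % n with hd
        have hd0 : 0 ≤ d := Int.emod_nonneg _ (by omega)
        have hdn : d < n := Int.emod_lt_of_pos _ hn
        -- the "hit" condition is d = 0
        have hcond : ((PySem.Int.mod idx n).toNat = i) ↔ d = 0 := by
          have hmod : PySem.Int.mod idx n = idx % n := PySem.Int.mod_eq_emod_of_pos hn
          have h0 : 0 ≤ idx % n := Int.emod_nonneg idx (by omega)
          have h1 : idx % n < n := Int.emod_lt_of_pos idx hn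
          have hrw : d = ((i : Int) - idx % n) % n := by
            have heq : (i : Int) - idx = ((i : Int) - idx % n) + n * (-(idx / n)) := by
              have h1 := Int.mul_ediv_add_emod idx n
              have h2 : n * (-(idx / n)) = -(n * (idx / n)) := by ring
              omega
            rw [hd, heq, Int.add_mul_emod_self_left]
          have hsm : ((i : Int) - idx % n) % n
              = if 0 ≤ (i : Int) - idx % n then (i : Int) - idx % n else (i : Int) - idx % n + n :=
            pv_emod_small n _ hn (by omega) (by omega)
          rw [hrw, hsm]
          split_ifs with h <;> omega
        -- next step's distance
        have hnext : ((i : Int) - (idx + 1)) % n = if d = 0 then n - 1 else d - 1 := by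
          have heq : (i : Int) - (idx + 1) = (d - 1) + n * (((i : Int) - idx) / n) := by
            have h1 := Int.mul_ediv_add_emod ((i : Int) - idx) n
            omega
          rw [heq, Int.add_mul_emod_self_left,
            pv_emod_small n (d - 1) hn (by omega) (by omega)]
          split_ifs with h1 h2 h3 <;> omega
        rw [pvHits.eq_def, if_pos hr, ih (r - 1) (idx + 1) (by omega) (by omega), hnext]
        by_cases hd0' : d = 0
        · rw [if_pos hd0', if_pos ((hcond).mpr hd0'), hd0']
          by_cases hbig : n - 1 < r - 1
          · rw [if_pos hbig, if_pos (by omega)]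
            have : r - 1 - 1 - (n - 1) = (r - 1 - 0) + n * (-1) := by ring
            rw [this, Int.add_mul_ediv_left _ _ (by omega : n ≠ 0)]
            ring
          · rw [if_neg hbig, if_pos (by omega)]
            have : (r - 1 - 0) / n = 0 := Int.ediv_eq_zero_of_lt (by omega) (by omega)
            omega
        · rw [if_neg hd0', if_neg (fun h => hd0' ((hcond).mp h))]
          have h1 : r - 1 - 1 - (d - 1) = r - 1 - d := by ring
          rw [h1]
          split_ifs with h2 h3 h4 <;> omega
      · have hd0 : 0 ≤ ((i : Int) - idx) % n := Int.emod_nonneg _ (by omega)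
        rw [pvHits.eq_def, if_neg hr, if_neg (by omega)]

-- closed round-robin count equals B's base/extra formula
lemma pv_arith (n r : Int) (hn : 0 < n) (i : Nat) (hi : (i : Int) < n) :
    (if (i : Int) < r then (r - 1 - (i : Int)) / n + 1 else 0)
      = (max r 0) / n + (if (i : Int) < (max r 0) % n then 1 else 0) := by
  rcases le_or_gt r 0 with hr | hr
  · rw [max_eq_right hr, if_neg (by omega), Int.zero_ediv, Int.zero_emod,
      if_neg (show ¬ ((i : Int) < 0) by omega)]
    omega
  · rw [max_eq_left (by omega)]
    have hqs : n * (r / n) + r % n = r := Int.mul_ediv_add_emod r n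
    have hs0 : 0 ≤ r % n := Int.emod_nonneg r (by omega)
    have hsn : r % n < n := Int.emod_lt_of_pos r hn
    have hq0 : 0 ≤ r / n := Int.ediv_nonneg (by omega) (by omega)
    have hsplit : (r - 1 - (i : Int)) = (r % n - 1 - (i : Int)) + n * (r / n) := by omega
    rcases lt_or_ge (i : Int) (r % n) with hcase | hcase
    · have hlt : (i : Int) < r := by nlinarith
      rw [if_pos hlt, if_pos hcase, hsplit, Int.add_mul_ediv_left _ _ (by omega : n ≠ 0),
        Int.ediv_eq_zero_of_lt (by omega) (by omega)]
      ring
    · rw [if_neg (show ¬ ((i : Int) < r % n) by omega)]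
      rcases eq_or_lt_of_le hq0 with hq | hq
      · -- q = 0, so r = r % n ≤ i : no extra round
        have hc : n * (r / n) = 0 := by rw [← hq]; ring
        rw [if_neg (show ¬ ((i : Int) < r) by omega)]
        omega
      · -- q ≥ 1, so i < n ≤ r : full rounds only
        have hq1 : 1 ≤ r / n := by omega
        have hnr : n ≤ r := by nlinarith
        rw [if_pos (show (i : Int) < r by omega), hsplit,
          Int.add_mul_ediv_left _ _ (by omega : n ≠ 0)]
        have hneg : (r % n - 1 - (i : Int)) / n = -1 := by
          have h1 : (r % n - 1 - (i : Int) + n * 1) / n = (r % n - 1 - (i : Int)) / n + 1 :=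
            Int.add_mul_ediv_left _ _ (by omega : n ≠ 0)
          have h2 : (r % n - 1 - (i : Int) + n * 1) / n = 0 :=
            Int.ediv_eq_zero_of_lt (by omega) (by omega)
          omega
        rw [hneg]
        omega

-- ===== VERDICT (by name: the statement is the Claim_ definition above) =====
theorem compute_alternating_counts_py_spec : Claim_equal_compute_alternating_counts_py := by
  intro total n _ hpre
  unfold Spec_compute_alternating_counts_py
  unfold compute_alternating_counts_py compute_alternating_counts_py_alt
  rcases lt_trichotomy n 0 with hn | hn | hn
  · -- n < 0 : Pre gives total ≤ n, the loop never runs, counts = [] on both sides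
    have htot : total ≤ n := by
      rcases hpre with h | h
      · omega
      · exact h
    rw [if_neg (by omega), if_pos (by omega), pvALoop.eq_def, if_neg (by omega)]
    have : n.toNat = 0 := by omega
    rw [this]
    rfl
  · subst hn; rfl
  · rw [if_neg (by omega), if_neg (by omega)]
    apply List.ext_getElem?
    intro i
    rw [pvALoop_getElem? n hn _ _ _ (by simp) (le_refl 0) i]
    by_cases hilt : i < n.toNat
    · have hin : (i : Int) < n := by omega
      have hrep : (List.replicate n.toNat (1 : Int))[i]? = some 1 := by
        rw [List.getElem?_eq_getElem (by simpa using hilt)]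
        simp
      have hrhs : ((PySem.List.pyRange 0 n 1).map
            (fun j => 1 + PySem.Int.floordiv (max (total - n) 0) n +
              (if j < PySem.Int.mod (max (total - n) 0) n then 1 else 0)))[i]?
          = some (1 + PySem.Int.floordiv (max (total - n) 0) n +
              (if (0 : Int) + i < PySem.Int.mod (max (total - n) 0) n then 1 else 0)) := by
        rw [List.getElem?_eq_getElem
          (by rw [List.length_map, PySem.List.length_pyRange_one]; omega)]
        rw [List.getElem_map, PySem.List.getElem_pyRange_one]
      rw [hrep, hrhs, Option.map_some,
        pvHits_closed n hn _ 0 (le_refl 0) i hin]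
      have h0 : ((i : Int) - 0) % n = (i : Int) := by
        rw [sub_zero]
        exact Int.emod_eq_of_lt (by omega) hin
      rw [h0, PySem.Int.floordiv_eq_ediv_of_pos hn, PySem.Int.mod_eq_emod_of_pos hn,
        pv_arith n (total - n) hn i hin]
      congr 1
      have : (0 : Int) + i = (i : Int) := by ring
      rw [this]
      ring
    · rw [List.getElem?_eq_none (by simpa using not_lt.mp hilt),
        List.getElem?_eq_none
          (by rw [List.length_map, PySem.List.length_pyRange_one]; omega)]
      rfl
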